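-- pv_equiv track=rewrite | github.com/dl-cv/labelme-ai | labelme/dlcv/widget2_5d/assign_json.py | process_product_data
-- ===== SOURCE A (Python) =====
-- def get_lcp(str_list):
--     """计算一组字符串的最长公共前缀"""
--     if not str_list:
--         return ""
--
--     # 取最短的字符串作为基准
--     s1 = min(str_list)
--     s2 = max(str_list)
--
--     for i, char in enumerate(s1):
--         if char != s2[i]:
--             return s1[:i]
--     return s1
--
-- def process_product_data(file_list):
--     # 1. 第一步：初步分组
--     groups = {}
--     for f in file_list:
--         if not f.lower().endswith(('.jpg', '.jpeg', '.png')):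
--             continue
--         product_id = f[:6]  # 提取 SXXXXX 作为分组键
--         if product_id not in groups:
--             groups[product_id] = []
--         groups[product_id].append(f)
--
--     results = {}
--
--     # 2. 第二步：计算每组的 LCP 并生成 JSON 名
--     for pid, files in groups.items():
--         # 获取该组图片的最长公共前缀
--         lcp = get_lcp(files)
--
--         # 3. 优化命名：去除末尾可能残余的特殊符号（如 _ 或 -）
--         json_base_name = lcp.rstrip('_-. ')
--
--         json_filename = f"{json_base_name}.json"
--         results[json_filename] = files
--
--     return results
-- ===== SOURCE B (Python) =====
-- def process_product_data(file_list):
--     # One pass: pid -> [files, running common prefix]; LCP fused into grouping.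
--     groups = {}
--     for f in file_list:
--         if not f.lower().endswith(('.jpg', '.jpeg', '.png')):
--             continue
--         pid = f[:6]
--         entry = groups.get(pid)
--         if entry is None:
--             groups[pid] = [[f], f]
--         else:
--             files, lcp = entry
--             files.append(f)
--             i = 0
--             while i < len(lcp) and i < len(f) and lcp[i] == f[i]:
--                 i += 1
--             entry[1] = lcp[:i]
--     results = {}
--     for files, lcp in groups.values():
--         results[lcp.rstrip('_-. ') + '.json'] = files
--     return results
-- ===== Notes on version B (the rewrite author's own statement) =====
-- stated objective: alternative
-- what changed: B computes each group's LCP incrementally in the single grouping pass (running character-wise common prefix per product id) instead of A's separate per-group get_lcp pass using the lexicographic min/max trick.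
import Mathlib
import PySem

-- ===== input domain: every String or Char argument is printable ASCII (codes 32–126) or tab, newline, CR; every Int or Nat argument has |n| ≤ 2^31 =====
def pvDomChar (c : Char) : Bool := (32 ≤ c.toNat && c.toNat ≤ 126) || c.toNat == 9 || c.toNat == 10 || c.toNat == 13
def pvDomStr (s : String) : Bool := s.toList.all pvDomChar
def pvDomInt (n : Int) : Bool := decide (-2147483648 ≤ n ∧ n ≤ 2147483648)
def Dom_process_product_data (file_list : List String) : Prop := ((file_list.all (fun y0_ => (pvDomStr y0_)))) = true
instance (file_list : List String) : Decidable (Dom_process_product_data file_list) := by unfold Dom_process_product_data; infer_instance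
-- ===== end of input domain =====

-- B fuses the per-group LCP computation into the single grouping pass (running character-wise
-- common prefix per product id), removing A's separate get_lcp pass with the min/max trick;
-- objective: alternative (same asymptotic cost, one pass instead of two).

-- ===== PORT A =====

-- shared helper: the guard `f.lower().endswith(('.jpg', '.jpeg', '.png'))` (identical line in A and B)
def pvIsImage (f : String) : Bool :=
  PySem.Str.endswith (PySem.Str.lower f) ".jpg" || PySem.Str.endswith (PySem.Str.lower f) ".jpeg" ||
    PySem.Str.endswith (PySem.Str.lower f) ".png"

-- shared helper: Python `s.rstrip('_-. ')`, ported by hand (PySem has no rstrip-with-chars);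
-- exact: drops the longest trailing run of characters among '_', '-', '.', ' '.
def pvRstripJunk (cs : List Char) : List Char :=
  (cs.reverse.dropWhile (fun c => c == '_' || c == '-' || c == '.' || c == ' ')).reverse

-- get_lcp's loop `for i, char in enumerate(s1): if char != s2[i]: return s1[:i]` / `return s1`;
-- `none` = IndexError on `s2[i]` (unreachable when s1/s2 are the min/max of one list).
def pvGetLcpLoop : List Char → List Char → Option (List Char)
  | [], _ => some []
  | _ :: _, [] => none
  | c :: t1, d :: t2 => if c ≠ d then some [] else (pvGetLcpLoop t1 t2).map (c :: ·)

def get_lcp (str_list : List String) : Option String :=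
  if str_list = [] then some ""
  else
    match PySem.List.min? str_list (fun x => x), PySem.List.max? str_list (fun x => x) with
    | some s1, some s2 => (pvGetLcpLoop s1.toList s2.toList).map String.ofList
    | _, _ => none   -- unreachable: the list is nonempty, so min/max exist

def process_product_data (file_list : List String) : List (String × List String) :=
  let groups := file_list.foldl (fun g f =>
    if !(pvIsImage f) then g
    else
      let product_id := PySem.Str.slice f none (some 6)
      let g := if g.contains product_id then g else g.insert product_id []
      match g.get? product_id with   -- `groups[product_id].append(f)`; none = KeyError (unreachable: just inserted)
      | some fs => g.insert product_id (fs ++ [f])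
      | none => g) (PySem.Dict.empty)
  let results := groups.items.foldl (fun r p =>
    let lcp := (get_lcp p.2).getD ""   -- get_lcp never hits its IndexError on these calls
    r.insert (String.ofList (pvRstripJunk lcp.toList ++ ".json".toList)) p.2) PySem.Dict.empty
  results.items

-- ===== PORT B =====

-- Source B's while loop: character-wise common prefix of the running lcp and the new file name
def pvCommonPrefix : List Char → List Char → List Char
  | c :: t1, d :: t2 => if c = d then c :: pvCommonPrefix t1 t2 else []
  | _, _ => []

def process_product_data_alt (file_list : List String) : List (String × List String) :=
  let groups := file_list.foldl (fun g f =>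
    if !(pvIsImage f) then g
    else
      let pid := PySem.Str.slice f none (some 6)
      match g.get? pid with
      | none => g.insert pid ([f], f.toList)
      | some e => g.insert pid (e.1 ++ [f], pvCommonPrefix e.2 f.toList))
    (PySem.Dict.empty : PySem.Dict String (List String × List Char))
  let results := groups.values.foldl (fun r (e : List String × List Char) =>
    r.insert (String.ofList (pvRstripJunk e.2 ++ ".json".toList)) e.1) PySem.Dict.empty
  results.items

-- ===== PRECONDITION & SPEC =====
def Spec_process_product_data (file_list : List String) (out : List (String × List String)) : Prop := out = process_product_data_alt file_list
instance (file_list : List String) (out : List (String × List String)) : Decidable (Spec_process_product_data file_list out) := by unfold Spec_process_product_data; infer_instance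

-- ===== CLAIM (what is proved, stated in full; the proofs are below) =====
def Claim_equal_process_product_data : Prop := ∀ (file_list : List String), Dom_process_product_data file_list → Spec_process_product_data file_list (process_product_data file_list)

-- ===== LEMMAS AND PROOFS =====

theorem pvCommonPrefix_nil_left (b : List Char) : pvCommonPrefix [] b = [] := by
  cases b <;> rfl

theorem pvCommonPrefix_prefix_left (a b : List Char) : pvCommonPrefix a b <+: a := by
  induction a generalizing b with
  | nil => cases b <;> simp [pvCommonPrefix]
  | cons c t1 ih =>
    cases b with
    | nil => simp [pvCommonPrefix]
    | cons d t2 =>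
      by_cases h : c = d <;> simp [pvCommonPrefix, h]
      exact ih t2

theorem pvCommonPrefix_prefix_right (a b : List Char) : pvCommonPrefix a b <+: b := by
  induction a generalizing b with
  | nil => cases b <;> simp [pvCommonPrefix]
  | cons c t1 ih =>
    cases b with
    | nil => simp [pvCommonPrefix]
    | cons d t2 =>
      by_cases h : c = d <;> simp [pvCommonPrefix, h]
      exact ih t2

theorem prefix_pvCommonPrefix (d a b : List Char) (ha : d <+: a) (hb : d <+: b) :
    d <+: pvCommonPrefix a b := by
  induction d generalizing a b with
  | nil => simp
  | cons x t ih =>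
    obtain ⟨u, rfl⟩ := ha
    obtain ⟨v, hv⟩ := hb
    cases b with
    | nil => simp at hv
    | cons y s =>
      simp only [List.cons_append, List.cons.injEq] at hv
      obtain ⟨rfl, hv⟩ := hv
      have hcp : pvCommonPrefix (x :: (t ++ u)) (x :: s) = x :: pvCommonPrefix (t ++ u) s := by
        simp [pvCommonPrefix]
      rw [List.cons_append, hcp]
      exact (List.cons_prefix_cons).2 ⟨rfl, ih _ _ (List.prefix_append t u) ⟨v, hv⟩⟩

theorem pvCons_le_cons_iff (a b : Char) (u v : List Char) :
    (a :: u : List Char) ≤ b :: v ↔ a < b ∨ (a = b ∧ u ≤ v) := by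
  rw [← not_lt, ← not_lt, List.cons_lt_cons_iff]
  rcases lt_trichotomy a b with hab | hab | hab
  · simp [hab, hab.ne', asymm hab]
  · subst hab; simp
  · simp [hab, asymm hab, hab.ne']

theorem pvLe_nil (l : List Char) (h : l ≤ ([] : List Char)) : l = [] := by
  cases l with
  | nil => rfl
  | cons x t => exact absurd (List.nil_lt_cons x t) (not_lt.2 h)

theorem pvCommonPrefix_prefix_of_between (a b c : List Char) (h1 : a ≤ b) (h2 : b ≤ c) :
    pvCommonPrefix a c <+: b := by
  induction a generalizing b c with
  | nil => simp [pvCommonPrefix_nil_left]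
  | cons x u ih =>
    cases c with
    | nil => simp [pvCommonPrefix]
    | cons z w =>
      by_cases hxz : x = z
      · subst hxz
        cases b with
        | nil => exact absurd (pvLe_nil _ h1) (by simp)
        | cons y v =>
          rcases (pvCons_le_cons_iff _ _ _ _).1 h1 with hxy | ⟨rfl, huv⟩
          · rcases (pvCons_le_cons_iff _ _ _ _).1 h2 with hyz | ⟨rfl, hvw⟩
            · exact absurd (hxy.trans hyz) (lt_irrefl _)
            · exact absurd hxy (lt_irrefl _)
          · rcases (pvCons_le_cons_iff _ _ _ _).1 h2 with hyz | ⟨_, hvw⟩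
            · exact absurd hyz (lt_irrefl _)
            · have hcp : pvCommonPrefix (x :: u) (x :: w) = x :: pvCommonPrefix u w := by
                simp [pvCommonPrefix]
              rw [hcp]
              exact (List.cons_prefix_cons).2 ⟨rfl, ih v w huv hvw⟩
      · simp [pvCommonPrefix, hxz]

theorem pvGetLcpLoop_of_le (l1 l2 : List Char) (h : l1 ≤ l2) :
    pvGetLcpLoop l1 l2 = some (pvCommonPrefix l1 l2) := by
  induction l1 generalizing l2 with
  | nil => simp [pvGetLcpLoop, pvCommonPrefix_nil_left]
  | cons c t1 ih =>
    cases l2 with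
    | nil => exact absurd (pvLe_nil _ h) (by simp)
    | cons d t2 =>
      by_cases hcd : c = d
      · subst hcd
        rcases (pvCons_le_cons_iff _ _ _ _).1 h with hlt | ⟨_, hle⟩
        · exact absurd hlt (lt_irrefl c)
        · simp [pvGetLcpLoop, pvCommonPrefix, ih t2 hle]
      · simp [pvGetLcpLoop, pvCommonPrefix, hcd]

theorem pvFoldl_cp_prefix (l : List String) (s : List Char) :
    (l.foldl (fun a y => pvCommonPrefix a y.toList) s) <+: s ∧
      ∀ y ∈ l, (l.foldl (fun a y => pvCommonPrefix a y.toList) s) <+: y.toList := by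
  induction l generalizing s with
  | nil => simp
  | cons z l ih =>
    obtain ⟨h1, h2⟩ := ih (pvCommonPrefix s z.toList)
    refine ⟨h1.trans (pvCommonPrefix_prefix_left _ _), ?_⟩
    intro y hy
    rcases List.mem_cons.1 hy with rfl | hy
    · exact h1.trans (pvCommonPrefix_prefix_right _ _)
    · exact h2 y hy

theorem pvPrefix_foldl_cp (l : List String) (s d : List Char) (h : d <+: s)
    (h2 : ∀ y ∈ l, d <+: y.toList) :
    d <+: l.foldl (fun a y => pvCommonPrefix a y.toList) s := by
  induction l generalizing s with
  | nil => simpa using h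
  | cons z l ih =>
    exact ih (pvCommonPrefix s z.toList)
      (prefix_pvCommonPrefix _ _ _ h (h2 z (by simp)))
      (fun y hy => h2 y (by simp [hy]))

def pvLcpFold (fs : List String) : List Char :=
  match fs with
  | [] => []
  | g :: rest => rest.foldl (fun a y => pvCommonPrefix a y.toList) g.toList

theorem pvLcpFold_append (fs : List String) (f : String) (h : fs ≠ []) :
    pvLcpFold (fs ++ [f]) = pvCommonPrefix (pvLcpFold fs) f.toList := by
  cases fs with
  | nil => exact absurd rfl h
  | cons g rest => simp [pvLcpFold, List.foldl_append]

theorem get_lcp_eq (fs : List String) (h : fs ≠ []) :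
    get_lcp fs = some (String.ofList (pvLcpFold fs)) := by
  obtain ⟨m, hm⟩ : ∃ m, PySem.List.min? fs (fun x => x) = some m := by
    cases hmin : PySem.List.min? fs (fun x => x) with
    | none => exact absurd ((PySem.List.min?_eq_none_iff _ _).1 hmin) h
    | some m => exact ⟨m, rfl⟩
  obtain ⟨M, hM⟩ : ∃ M, PySem.List.max? fs (fun x => x) = some M := by
    cases hmax : PySem.List.max? fs (fun x => x) with
    | none => exact absurd ((PySem.List.max?_eq_none_iff _ _).1 hmax) h
    | some M => exact ⟨M, rfl⟩
  have hmMem := PySem.List.min?_mem hm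
  have hMMem := PySem.List.max?_mem hM
  have hmin := PySem.List.min?_isMin hm
  have hmax := PySem.List.max?_isMax hM
  have hmM : m.toList ≤ M.toList := String.le_iff_toList_le.1 (hmin M hMMem)
  have hloop := pvGetLcpLoop_of_le m.toList M.toList hmM
  have hcp : pvCommonPrefix m.toList M.toList = pvLcpFold fs := by
    cases fs with
    | nil => exact absurd rfl h
    | cons g rest =>
      obtain ⟨hf1, hf2⟩ := pvFoldl_cp_prefix rest g.toList
      have hX : ∀ y ∈ g :: rest,
          (rest.foldl (fun a y => pvCommonPrefix a y.toList) g.toList) <+: y.toList := by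
        intro y hy
        rcases List.mem_cons.1 hy with rfl | hy
        · exact hf1
        · exact hf2 y hy
      have hbk : pvCommonPrefix m.toList M.toList <+:
          rest.foldl (fun a y => pvCommonPrefix a y.toList) g.toList := by
        refine pvPrefix_foldl_cp rest g.toList _ ?_ ?_
        · exact pvCommonPrefix_prefix_of_between m.toList g.toList M.toList
            (String.le_iff_toList_le.1 (hmin g (by simp)))
            (String.le_iff_toList_le.1 (hmax g (by simp)))
        · intro y hy
          exact pvCommonPrefix_prefix_of_between m.toList y.toList M.toList
            (String.le_iff_toList_le.1 (hmin y (by simp [hy])))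
            (String.le_iff_toList_le.1 (hmax y (by simp [hy])))
      have hfw : (rest.foldl (fun a y => pvCommonPrefix a y.toList) g.toList) <+:
          pvCommonPrefix m.toList M.toList :=
        prefix_pvCommonPrefix _ _ _ (hX m hmMem) (hX M hMMem)
      have hl1 := hbk.length_le
      have hl2 := hfw.length_le
      exact (hbk.eq_of_length (by omega)).symm ▸ rfl
  unfold get_lcp
  rw [if_neg h, hm, hM]
  simp [hloop, hcp]

def pvPhi (p : String × List String) : String × (List String × List Char) :=
  (p.1, (p.2, pvLcpFold p.2))

theorem pvGet?_mk_map (l : List (String × List String)) (k : String) :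
    (PySem.Dict.mk (l.map pvPhi)).get? k
      = ((PySem.Dict.mk l).get? k).map (fun fs => (fs, pvLcpFold fs)) := by
  induction l with
  | nil => rfl
  | cons p rest ih =>
    obtain ⟨pk, pv⟩ := p
    simp only [List.map_cons, pvPhi, PySem.Dict.get?_mk_cons]
    by_cases hk : pk == k
    · simp [hk]
    · simp only [hk, Bool.false_eq_true, if_false, ih]

theorem pvContains_mk_map (l : List (String × List String)) (k : String) :
    (PySem.Dict.mk (l.map pvPhi)).contains k = (PySem.Dict.mk l).contains k := by
  rw [PySem.Dict.contains_eq_isSome_get?, PySem.Dict.contains_eq_isSome_get?, pvGet?_mk_map]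
  cases (PySem.Dict.mk l).get? k <;> rfl

theorem pvInsert_mk_map (l : List (String × List String)) (k : String) (v : List String) :
    (PySem.Dict.mk (l.map pvPhi)).insert k (v, pvLcpFold v)
      = PySem.Dict.mk (((PySem.Dict.mk l).insert k v).items.map pvPhi) := by
  apply PySem.Dict.ext
  rw [PySem.Dict.items_insert, PySem.Dict.items_insert, pvContains_mk_map]
  by_cases hc : (PySem.Dict.mk l).contains k
  · simp only [hc, if_true]
    show ((PySem.Dict.mk l).items.map pvPhi).map _ = _
    rw [List.map_map, List.map_map]
    apply List.map_congr_left
    intro p _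
    obtain ⟨pk, pv⟩ := p
    by_cases hk : pk == k
    · simp [pvPhi, Function.comp, hk]
    · simp [pvPhi, Function.comp, hk]
  · simp only [hc, Bool.false_eq_true, if_false]
    show (PySem.Dict.mk l).items.map pvPhi ++ [(k, (v, pvLcpFold v))] = _
    simp [pvPhi]

-- the grouping-loop simulation invariant
def pvInv (gA : PySem.Dict String (List String))
    (gB : PySem.Dict String (List String × List Char)) : Prop :=
  gB = PySem.Dict.mk (gA.items.map pvPhi) ∧ ∀ p ∈ gA.items, p.2 ≠ []

theorem pvInv_step (f : String) (gA : PySem.Dict String (List String))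
    (gB : PySem.Dict String (List String × List Char)) (h : pvInv gA gB) :
    pvInv
      (if !(pvIsImage f) then gA
       else
         let product_id := PySem.Str.slice f none (some 6)
         let g := if gA.contains product_id then gA else gA.insert product_id []
         match g.get? product_id with
         | some fs => g.insert product_id (fs ++ [f])
         | none => g)
      (if !(pvIsImage f) then gB
       else
         let pid := PySem.Str.slice f none (some 6)
         match gB.get? pid with
         | none => gB.insert pid ([f], f.toList)
         | some e => gB.insert pid (e.1 ++ [f], pvCommonPrefix e.2 f.toList)) := by
  obtain ⟨hB, hNE⟩ := h
  by_cases him : pvIsImage f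
  · simp only [him, Bool.not_true, Bool.false_eq_true, if_false]
    subst hB
    set pid := PySem.Str.slice f none (some 6) with hpid
    have hget : (PySem.Dict.mk (gA.items.map pvPhi)).get? pid
        = (gA.get? pid).map (fun fs => (fs, pvLcpFold fs)) := pvGet?_mk_map gA.items pid
    by_cases hc : gA.contains pid
    · obtain ⟨fs, hfs⟩ : ∃ fs, gA.get? pid = some fs := by
        rw [PySem.Dict.contains_eq_isSome_get?] at hc
        cases hg : gA.get? pid with
        | none => rw [hg] at hc; simp at hc
        | some fs => exact ⟨fs, rfl⟩
      have hfsne : fs ≠ [] := hNE (pid, fs) (PySem.Dict.mem_items_of_get?_eq_some gA hfs)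
      simp only [hc, if_true, hfs, hget, Option.map_some]
      constructor
      · rw [← pvLcpFold_append fs f hfsne]
        exact pvInsert_mk_map gA.items pid (fs ++ [f])
      · intro p hp
        rcases (PySem.Dict.mem_items_insert gA pid (fs ++ [f]) p).1 hp with rfl | ⟨hp, _⟩
        · simp
        · exact hNE p hp
    · have hgnone : gA.get? pid = none := by
        rw [PySem.Dict.contains_eq_isSome_get?] at hc
        cases hg : gA.get? pid with
        | none => rfl
        | some fs => rw [hg] at hc; simp at hc
      simp only [hc, Bool.false_eq_true, if_false, PySem.Dict.get?_insert_self, hget, hgnone,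
        Option.map_none]
      rw [PySem.Dict.insert_insert_self]
      constructor
      · exact pvInsert_mk_map gA.items pid ([] ++ [f])
      · intro p hp
        rcases (PySem.Dict.mem_items_insert gA pid ([] ++ [f]) p).1 hp with rfl | ⟨hp, _⟩
        · simp
        · exact hNE p hp
  · simp only [him, Bool.not_false, if_true]
    exact ⟨hB, hNE⟩

theorem pvInv_foldl (file_list : List String) (gA : PySem.Dict String (List String))
    (gB : PySem.Dict String (List String × List Char)) (h : pvInv gA gB) :
    pvInv
      (file_list.foldl (fun g f =>
        if !(pvIsImage f) then g
        else
          let product_id := PySem.Str.slice f none (some 6)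
          let g := if g.contains product_id then g else g.insert product_id []
          match g.get? product_id with
          | some fs => g.insert product_id (fs ++ [f])
          | none => g) gA)
      (file_list.foldl (fun g f =>
        if !(pvIsImage f) then g
        else
          let pid := PySem.Str.slice f none (some 6)
          match g.get? pid with
          | none => g.insert pid ([f], f.toList)
          | some e => g.insert pid (e.1 ++ [f], pvCommonPrefix e.2 f.toList)) gB) := by
  induction file_list generalizing gA gB with
  | nil => exact h
  | cons f rest ih => exact ih _ _ (pvInv_step f gA gB h)

-- ===== VERDICT (by name: the statement is the Claim_ definition above) =====
theorem process_product_data_spec : Claim_equal_process_product_data := by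
  intro file_list _
  unfold Spec_process_product_data process_product_data process_product_data_alt
  obtain ⟨hB, hNE⟩ := pvInv_foldl file_list PySem.Dict.empty PySem.Dict.empty ⟨rfl, by intro p hp; simp [PySem.Dict.empty] at hp⟩
  simp only []
  rw [hB]
  apply congrArg PySem.Dict.items
  show _ = List.foldl _ _ (PySem.Dict.values (PySem.Dict.mk _))
  simp only [PySem.Dict.values, List.map_map, List.foldl_map]
  refine PySem.List.foldl_congr_mem _ _ _ _ ?_
  intro r p hp
  rw [get_lcp_eq p.2 (hNE p hp)]
  simp [pvPhi, String.toList_ofList]
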